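-- pv_equiv track=rewrite | github.com/njcuk9999/apero-drs | apero/lang/core/drs_exceptions.py | _flatmessage
-- ===== SOURCE A (Python) =====
-- def _flatmessage(message):
--
--     # deal with message format (convert to TextEntry)
--     if message is None:
--         message = ['']
--     elif type(message) is str:
--         message = [message]
--     elif type(message) is not list:
--         message = ['']
--     outstring = ''
--     for mess in message:
--         mess = mess.replace('\t', ' ')
--         mess = mess.replace('\n', ' ')
--         while '  ' in mess:
--             mess = mess.replace('  ', ' ')
--         outstring += mess
--     return outstring
-- ===== SOURCE B (Python) =====
-- def _flatmessage(message):
--     # deal with message format (same input-type guard as the original)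
--     if message is None:
--         message = ['']
--     elif type(message) is str:
--         message = [message]
--     elif type(message) is not list:
--         message = ['']
--     out = []
--     for mess in message:
--         prev_space = False
--         for ch in mess:
--             if ch in (' ', '\t', '\n'):
--                 if not prev_space:
--                     out.append(' ')
--                 prev_space = True
--             else:
--                 out.append(ch)
--                 prev_space = False
--     return ''.join(out)
-- ===== Notes on version B (the rewrite author's own statement) =====
-- stated objective: simpler
-- what changed: Replaces the three replace passes and the repeated `while ' ' in mess` collapse with a single left-to-right character scan carrying a prev_space flag that emits at most one space per whitespace run.
import Mathlib
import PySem

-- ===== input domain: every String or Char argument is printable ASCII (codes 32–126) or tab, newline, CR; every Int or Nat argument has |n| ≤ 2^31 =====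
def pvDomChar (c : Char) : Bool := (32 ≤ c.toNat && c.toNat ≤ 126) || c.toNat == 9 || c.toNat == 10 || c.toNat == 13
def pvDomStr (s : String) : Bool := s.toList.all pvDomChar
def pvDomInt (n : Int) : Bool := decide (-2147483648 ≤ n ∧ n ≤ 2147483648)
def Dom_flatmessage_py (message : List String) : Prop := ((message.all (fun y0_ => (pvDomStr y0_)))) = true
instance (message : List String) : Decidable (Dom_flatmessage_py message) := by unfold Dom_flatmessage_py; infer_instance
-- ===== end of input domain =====

-- B replaces A's repeated replace passes and while-collapse by a single left-to-right scan with a prev_space flag (objective: simpler one-pass rewrite; not measurably faster in CPython).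

-- ===== PORT A =====
-- spec of one replace("  "," ") pass; the port's while loop cites the length lemma below for termination
def pvR2 : List Char → List Char
  | ' ' :: ' ' :: t => ' ' :: pvR2 t
  | c :: t => c :: pvR2 t
  | [] => []

theorem pvReplace_dd (s : List Char) :
    PySem.Chars.replace s [' ', ' '] [' '] = pvR2 s := by
  have go : ∀ (l : List Char) (fuel : Nat) (acc : List Char), l.length ≤ fuel →
      PySem.Chars.replace.go [' ', ' '] [' '] fuel l acc = acc.reverse ++ pvR2 l := by
    intro l
    induction l using pvR2.induct with
    | case1 t ih =>
      intro fuel acc h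
      match fuel with
      | fuel + 1 =>
        have hpre : [' ', ' '].isPrefixOf (' ' :: ' ' :: t) = true := by
          simp [List.isPrefixOf]
        simp only [PySem.Chars.replace.go, hpre, if_pos, List.length_cons, List.drop_succ_cons,
          List.length_nil, List.drop_zero]
        rw [ih fuel ([' '].reverse ++ acc) (by simp at h ⊢; omega)]
        simp [pvR2]
    | case2 c t hne ih =>
      intro fuel acc h
      match fuel with
      | fuel + 1 =>
        have hpre : [' ', ' '].isPrefixOf (c :: t) = false := by
          cases t with
          | nil => simp [List.isPrefixOf]
          | cons d t' =>
            by_contra hb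
            simp only [Bool.not_eq_false, List.isPrefixOf, Bool.and_eq_true, beq_iff_eq] at hb
            first | exact hne hb.1.symm hb.2.symm | exact hne _ (by rw [←hb.1, ←hb.2]) | (exfalso; revert hne; simp_all; exact ⟨hb.1.symm, hb.2.symm⟩)
        simp only [PySem.Chars.replace.go, hpre]
        rw [if_neg (by simp)]
        rw [ih fuel (c :: acc) (by simp at h ⊢; omega)]
        have : pvR2 (c :: t) = c :: pvR2 t := by
          rw [pvR2.eq_def]
          split
          · rename_i h2; exfalso; injection h2 with h3 h4; subst h3
            cases h4; exact absurd hpre (by simp [List.isPrefixOf])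
          · rename_i h2; injection h2 with h3 h4; subst h3; subst h4; rfl
          · simp_all
        rw [this]; simp
    | case3 =>
      intro fuel acc h
      cases fuel <;> simp [PySem.Chars.replace.go, pvR2]
  simp only [PySem.Chars.replace, List.isEmpty]
  exact go s s.length [] (le_refl _)

theorem pvR2_len_le (s : List Char) : (pvR2 s).length ≤ s.length := by
  fun_induction pvR2 s <;> simp_all <;> omega

theorem pvR2_len_lt (s : List Char) (h : [' ', ' '] <:+: s) :
    (pvR2 s).length < s.length := by
  fun_induction pvR2 s with
  | case1 t ih =>
    have := pvR2_len_le t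
    simp [pvR2]; omega
  | case2 c t hne ih =>
    have ht : [' ', ' '] <:+: t := by
      rcases List.infix_cons_iff.mp h with hp | ht'
      · exfalso
        obtain ⟨l', hl'⟩ := hp
        injection hl' with e1 e2
        exact hne l' e1.symm e2.symm
      · exact ht'
    have := ih ht
    simp [pvR2]; omega
  | case3 => simp at h

theorem pvReplace_len_lt (s : List Char) (h : PySem.Chars.isIn [' ', ' '] s = true) :
    (PySem.Chars.replace s [' ', ' '] [' ']).length < s.length := by
  rw [pvReplace_dd]
  exact pvR2_len_lt s ((PySem.Chars.isIn_iff_infix _ _).mp h)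

-- the 'while "  " in mess: mess = mess.replace("  ", " ")' loop of A
def pvWhileCollapse (s : List Char) : List Char :=
  if PySem.Chars.isIn [' ', ' '] s then
    pvWhileCollapse (PySem.Chars.replace s [' ', ' '] [' '])
  else s
termination_by s.length
decreasing_by exact pvReplace_len_lt s (by assumption)

def flatmessage_py (message : List String) : String :=
  String.mk (message.foldl (fun outstring mess =>
    outstring ++ pvWhileCollapse
      (PySem.Chars.replace (PySem.Chars.replace mess.toList ['\t'] [' ']) ['\n'] [' '])) [])

-- ===== PORT B =====
def pvScan : List Char → Bool → List Char
  | [], _ => []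
  | c :: t, prev =>
    if c = ' ' ∨ c = '\t' ∨ c = '\n' then
      (if prev then pvScan t true else ' ' :: pvScan t true)
    else c :: pvScan t false

def flatmessage_py_alt (message : List String) : String :=
  String.mk (message.foldl (fun out mess => out ++ pvScan mess.toList false) [])

-- ===== PRECONDITION & SPEC =====
def Spec_flatmessage_py (message : List String) (out : String) : Prop := out = flatmessage_py_alt message
instance (message : List String) (out : String) : Decidable (Spec_flatmessage_py message out) := by unfold Spec_flatmessage_py; infer_instance

-- ===== CLAIM (what is proved, stated in full; the proofs are below) =====
def Claim_equal_flatmessage_py : Prop := ∀ (message : List String), Dom_flatmessage_py message → Spec_flatmessage_py message (flatmessage_py message)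

-- ===== LEMMAS AND PROOFS =====
-- B's scan restricted to spaces only (what the while loop computes after the tab/newline replaces)
def pvSq : List Char → Bool → List Char
  | [], _ => []
  | c :: t, prev =>
    if c = ' ' then (if prev then pvSq t true else ' ' :: pvSq t true)
    else c :: pvSq t false

theorem pvSq_r2 (s : List Char) : ∀ b, pvSq (pvR2 s) b = pvSq s b := by
  fun_induction pvR2 s with
  | case1 t ih => intro b; cases b <;> simp [pvSq, ih]
  | case2 c t hne ih =>
    intro b
    by_cases hc : c = ' ' <;> cases b <;> simp [pvSq, hc, ih]
  | case3 => intro b; rfl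

theorem pvSq_id (s : List Char) (h : ¬ ([' ', ' '] <:+: s)) :
    pvSq s false = s ∧ ((s.head? ≠ some ' ') → pvSq s true = s) := by
  induction s with
  | nil => simp [pvSq]
  | cons c t ih =>
    have ht : ¬ ([' ', ' '] <:+: t) := fun h' => h (h'.trans (List.suffix_cons c t).isInfix)
    obtain ⟨ih1, ih2⟩ := ih ht
    by_cases hc : c = ' '
    · subst hc
      have hhead : t.head? ≠ some ' ' := by
        intro hh
        cases t with
        | nil => simp at hh
        | cons d t' =>
          simp at hh
          exact h ⟨[], t', by simp [hh]⟩
      constructor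
      · simp [pvSq, ih2 hhead]
      · intro hh; simp at hh
    · refine ⟨by simp [pvSq, hc, ih1], fun _ => by simp [pvSq, hc, ih1]⟩

theorem pvWhileCollapse_eq_sq (s : List Char) : pvWhileCollapse s = pvSq s false := by
  fun_induction pvWhileCollapse s with
  | case1 s h ih => rw [ih, pvReplace_dd, pvSq_r2]
  | case2 s h =>
    exact ((pvSq_id s ((PySem.Chars.isIn_eq_false_iff _ _).mp (by simpa using h))).1).symm

theorem pvReplace_single (s : List Char) (c0 d : Char) :
    PySem.Chars.replace s [c0] [d] = s.map (fun x => if x = c0 then d else x) := by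
  have go : ∀ (l : List Char) (fuel : Nat) (acc : List Char), l.length ≤ fuel →
      PySem.Chars.replace.go [c0] [d] fuel l acc =
        acc.reverse ++ l.map (fun x => if x = c0 then d else x) := by
    intro l
    induction l with
    | nil => intro fuel acc h; cases fuel <;> simp [PySem.Chars.replace.go]
    | cons c t ih =>
      intro fuel acc h
      match fuel with
      | fuel + 1 =>
        by_cases hc : c = c0
        · have hp : [c0].isPrefixOf (c :: t) = true := by simp [List.isPrefixOf, hc]
          simp only [PySem.Chars.replace.go, hp, if_pos, List.length_cons, List.length_nil,
            List.drop_succ_cons, List.drop_zero]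
          rw [ih fuel ([d].reverse ++ acc) (by simp at h ⊢; omega)]
          simp [hc]
        · have hp : [c0].isPrefixOf (c :: t) = false := by
            simp only [List.isPrefixOf, List.isPrefixOf_nil_left, Bool.and_true]
            exact beq_eq_false_iff_ne.mpr (fun h' => hc h'.symm)
          simp only [PySem.Chars.replace.go, hp]
          rw [if_neg (by simp)]
          rw [ih fuel (c :: acc) (by simp at h ⊢; omega)]
          simp [hc]
  simp only [PySem.Chars.replace, List.isEmpty]
  exact go s s.length [] (le_refl _)

theorem pvSq_map_eq_scan (s : List Char) : ∀ b,
    pvSq (s.map (fun x => if (if x = '\t' then ' ' else x) = '\n' then ' '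
                          else (if x = '\t' then ' ' else x))) b = pvScan s b := by
  induction s with
  | nil => intro b; rfl
  | cons c t ih =>
    intro b
    by_cases h1 : c = ' ' <;> by_cases h2 : c = '\t' <;> by_cases h3 : c = '\n' <;>
      simp_all [pvSq, pvScan] <;> cases b <;> simp [pvSq, pvScan, ih]

theorem pvProcess_eq (mess : String) :
    pvWhileCollapse (PySem.Chars.replace (PySem.Chars.replace mess.toList ['\t'] [' ']) ['\n'] [' ']) =
      pvScan mess.toList false := by
  rw [pvWhileCollapse_eq_sq, pvReplace_single, pvReplace_single, List.map_map]
  exact pvSq_map_eq_scan mess.toList false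

-- ===== VERDICT (by name: the statement is the Claim_ definition above) =====
theorem flatmessage_py_spec : Claim_equal_flatmessage_py := by
  intro message _
  unfold Spec_flatmessage_py flatmessage_py flatmessage_py_alt
  congr 1
  apply PySem.List.foldl_congr_mem
  intro acc mess _
  rw [pvProcess_eq]
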